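-- pv_equiv track=rewrite | github.com/google/clusterfuzz | src/python/bot/fuzzers/dictionary_manager.py | parse_recommended_dictionary_from_log_lines
-- ===== SOURCE A (Python) =====
-- TOKEN_RECOMMENDED_DICT_END = 'End of recommended dictionary.'
--
-- TOKEN_RECOMMENDED_DICT_START = 'Recommended dictionary.'
--
-- def extract_dictionary_element(line):
--   """Extract a dictionary element from the given string."""
--   # An element should start and end with a double-quote.
--   start_index = line.find('"')
--   end_index = line.rfind('"')
--   if start_index == -1 or end_index == -1 or start_index == end_index:
--     return None
--
--   element = line[start_index:end_index + 1]
--   return element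
--
-- def parse_recommended_dictionary_from_log_lines(log_lines):
--   """Extract recommended dictionary entriees from the given log lines.
--
--   Args:
--     log_lines: A list of strings from a fuzzer log.
--
--   Returns:
--     A set containing recommended dictionary lines.
--   """
--   # Process the lines in reverse order, as dictionary section is in the end.
--   index = len(log_lines)
--   while index:
--     index -= 1
--     if TOKEN_RECOMMENDED_DICT_END in log_lines[index]:
--       # Found the section, now extract its entries.
--       break
--
--   recommended_entries = []
--   while index:
--     index -= 1
--     if TOKEN_RECOMMENDED_DICT_START in log_lines[index]:
--       # Beginning of the section reached, bail out.
--       break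
--
--     element = extract_dictionary_element(log_lines[index])
--     if element:
--       recommended_entries.append(element)
--
--   return recommended_entries
-- ===== SOURCE B (Python) =====
-- TOKEN_RECOMMENDED_DICT_END = 'End of recommended dictionary.'
--
-- TOKEN_RECOMMENDED_DICT_START = 'Recommended dictionary.'
--
-- def extract_dictionary_element(line):
--   """Extract a dictionary element from the given string."""
--   start_index = line.find('"')
--   end_index = line.rfind('"')
--   if start_index == -1 or end_index == -1 or start_index == end_index:
--     return None
--   return line[start_index:end_index + 1]
--
-- def parse_recommended_dictionary_from_log_lines(log_lines):
--   """Single forward pass: accumulate extracted elements since the most recent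
--   START marker; every END marker snapshots the accumulator (reversed) as the
--   current answer. The last snapshot wins, so the result equals the section
--   between the last END marker and the nearest preceding START marker."""
--   result = []
--   acc = []
--   for line in log_lines:
--     if TOKEN_RECOMMENDED_DICT_END in line:
--       result = acc[::-1]
--     if TOKEN_RECOMMENDED_DICT_START in line:
--       acc = []
--     else:
--       element = extract_dictionary_element(line)
--       if element:
--         acc.append(element)
--   return result
-- ===== Notes on version B (the rewrite author's own statement) =====
-- stated objective: alternative
-- what changed: A's two backward index-decrementing loops (find last END marker, then scan down extracting until a START marker) are replaced by a single forward pass with a reset-on-START accumulator that is snapshotted (reversed) at every END marker, the last snapshot being the answer.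
import Mathlib
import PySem

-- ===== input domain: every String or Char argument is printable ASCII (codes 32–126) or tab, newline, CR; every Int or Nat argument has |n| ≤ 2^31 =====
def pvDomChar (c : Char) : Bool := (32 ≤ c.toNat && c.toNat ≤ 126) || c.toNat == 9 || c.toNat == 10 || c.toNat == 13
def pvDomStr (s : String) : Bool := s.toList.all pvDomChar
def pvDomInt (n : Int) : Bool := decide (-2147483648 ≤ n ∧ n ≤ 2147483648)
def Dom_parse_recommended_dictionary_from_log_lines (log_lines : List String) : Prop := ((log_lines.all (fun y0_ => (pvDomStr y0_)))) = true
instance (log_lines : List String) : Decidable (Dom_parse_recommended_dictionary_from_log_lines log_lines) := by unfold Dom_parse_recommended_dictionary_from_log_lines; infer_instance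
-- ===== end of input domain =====

-- B replaces A's backward index-decrementing search-and-extract loops with a single FORWARD pass:
-- an accumulator of extracted elements that resets at each START marker, snapshotted (reversed) at
-- each END marker; the last snapshot is the answer (objective: alternative algorithm, same value).

def TOKEN_RECOMMENDED_DICT_END : String := "End of recommended dictionary."

def TOKEN_RECOMMENDED_DICT_START : String := "Recommended dictionary."

-- shared helper (identical in Source A and Source B)
def extract_dictionary_element (line : String) : Option String :=
  let start_index := PySem.Str.find line "\""
  let end_index := PySem.Str.rfind line "\""
  if start_index = -1 ∨ end_index = -1 ∨ start_index = end_index then none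
  else some (PySem.Str.slice line (some start_index) (some (end_index + 1)))

-- ===== PORT A =====
-- first while loop: index counts down, breaks (returning the decremented index) on the END token
def pvAFindEnd (log_lines : List String) : Nat → Nat
  | 0 => 0
  | i + 1 =>
    if PySem.Str.isIn TOKEN_RECOMMENDED_DICT_END (PySem.List.pyGetD log_lines (i : Int) "") then i
    else pvAFindEnd log_lines i

-- second while loop: counts down from the END index, breaks on the START token, appends truthy elements
def pvACollect (log_lines : List String) : Nat → List String → List String
  | 0, acc => acc
  | i + 1, acc =>
    if PySem.Str.isIn TOKEN_RECOMMENDED_DICT_START (PySem.List.pyGetD log_lines (i : Int) "") then acc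
    else
      match extract_dictionary_element (PySem.List.pyGetD log_lines (i : Int) "") with
      | some e => if e = "" then pvACollect log_lines i acc else pvACollect log_lines i (acc ++ [e])
      | none => pvACollect log_lines i acc

def parse_recommended_dictionary_from_log_lines (log_lines : List String) : List String :=
  pvACollect log_lines (pvAFindEnd log_lines log_lines.length) []

-- ===== PORT B =====
-- loop body of Source B: state = (result, acc); END snapshots acc[::-1], START resets acc,
-- otherwise a truthy extracted element is appended
def pvBStep (st : List String × List String) (line : String) : List String × List String :=
  let result := if PySem.Str.isIn TOKEN_RECOMMENDED_DICT_END line then st.2.reverse else st.1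
  if PySem.Str.isIn TOKEN_RECOMMENDED_DICT_START line then (result, [])
  else
    match extract_dictionary_element line with
    | some element => if element = "" then (result, st.2) else (result, st.2 ++ [element])
    | none => (result, st.2)

def parse_recommended_dictionary_from_log_lines_alt (log_lines : List String) : List String :=
  (log_lines.foldl pvBStep ([], [])).1

-- ===== PRECONDITION & SPEC =====
def Spec_parse_recommended_dictionary_from_log_lines (log_lines : List String) (out : List String) : Prop := out = parse_recommended_dictionary_from_log_lines_alt log_lines
instance (log_lines : List String) (out : List String) : Decidable (Spec_parse_recommended_dictionary_from_log_lines log_lines out) := by unfold Spec_parse_recommended_dictionary_from_log_lines; infer_instance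

-- ===== CLAIM (what is proved, stated in full; the proofs are below) =====
def Claim_equal_parse_recommended_dictionary_from_log_lines : Prop := ∀ (log_lines : List String), Dom_parse_recommended_dictionary_from_log_lines log_lines → Spec_parse_recommended_dictionary_from_log_lines log_lines (parse_recommended_dictionary_from_log_lines log_lines)

-- ===== LEMMAS AND PROOFS =====

-- the element-list a single line contributes (empty, or one truthy element)
def pvKeep (line : String) : List String :=
  match extract_dictionary_element line with
  | some e => if e = "" then [] else [e]
  | none => []

-- the accumulator pulls out in front of the collected section
theorem pvACollect_acc (xs : List String) : ∀ (k : Nat) (acc : List String),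
    pvACollect xs k acc = acc ++ pvACollect xs k [] := by
  intro k
  induction k with
  | zero => intro acc; simp [pvACollect]
  | succ k ih =>
    intro acc
    simp only [pvACollect]
    by_cases hp : PySem.Str.isIn TOKEN_RECOMMENDED_DICT_START (PySem.List.pyGetD xs (k : Int) "") = true
    · rw [if_pos hp, if_pos hp]; simp
    · rw [if_neg hp, if_neg hp]
      cases he : extract_dictionary_element (PySem.List.pyGetD xs (k : Int) "") with
      | none => exact ih acc
      | some e =>
        simp only []
        by_cases hee : e = ""
        · rw [if_pos hee, if_pos hee]; exact ih acc
        · rw [if_neg hee, if_neg hee, ih (acc ++ [e]), ih ([] ++ [e])]; simp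
  
-- indexing below xs.length ignores an appended element
theorem pvGetD_append_lt (xs : List String) (x : String) (i : Nat) (h : i < xs.length) :
    PySem.List.pyGetD (xs ++ [x]) (i : Int) "" = PySem.List.pyGetD xs (i : Int) "" := by
  rw [PySem.List.pyGetD_natCast, PySem.List.pyGetD_natCast]
  simp [List.getD, List.getElem?_append_left h]

theorem pvGetD_append_last (xs : List String) (x : String) :
    PySem.List.pyGetD (xs ++ [x]) ((xs.length : Nat) : Int) "" = x := by
  rw [PySem.List.pyGetD_natCast]
  simp [List.getD]

theorem pvAFindEnd_append (xs : List String) (x : String) : ∀ (k : Nat), k ≤ xs.length →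
    pvAFindEnd (xs ++ [x]) k = pvAFindEnd xs k := by
  intro k
  induction k with
  | zero => intro _; simp [pvAFindEnd]
  | succ k ih =>
    intro hk
    simp only [pvAFindEnd]
    rw [pvGetD_append_lt xs x k (by omega)]
    by_cases hp : PySem.Str.isIn TOKEN_RECOMMENDED_DICT_END (PySem.List.pyGetD xs (k : Int) "") = true
    · rw [if_pos hp, if_pos hp]
    · rw [if_neg hp, if_neg hp]; exact ih (by omega)

theorem pvACollect_append (xs : List String) (x : String) : ∀ (k : Nat) (acc : List String), k ≤ xs.length →
    pvACollect (xs ++ [x]) k acc = pvACollect xs k acc := by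
  intro k
  induction k with
  | zero => intro acc _; simp [pvACollect]
  | succ k ih =>
    intro acc hk
    simp only [pvACollect]
    rw [pvGetD_append_lt xs x k (by omega)]
    by_cases hp : PySem.Str.isIn TOKEN_RECOMMENDED_DICT_START (PySem.List.pyGetD xs (k : Int) "") = true
    · rw [if_pos hp, if_pos hp]
    · rw [if_neg hp, if_neg hp]
      cases he : extract_dictionary_element (PySem.List.pyGetD xs (k : Int) "") with
      | none => exact ih acc (by omega)
      | some e =>
        simp only []
        by_cases hee : e = ""
        · rw [if_pos hee, if_pos hee]; exact ih acc (by omega)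
        · rw [if_neg hee, if_neg hee]; exact ih (acc ++ [e]) (by omega)

theorem pvAFindEnd_le (xs : List String) : ∀ (k : Nat), pvAFindEnd xs k ≤ k := by
  intro k
  induction k with
  | zero => simp [pvAFindEnd]
  | succ k ih =>
    simp only [pvAFindEnd]
    split
    · omega
    · omega

-- the backward-collected section (from the very end, down to the nearest START)
def pvG (xs : List String) : List String := pvACollect xs xs.length []

theorem pvG_snoc (xs : List String) (x : String) :
    pvG (xs ++ [x]) =
      if PySem.Str.isIn TOKEN_RECOMMENDED_DICT_START x then [] else pvKeep x ++ pvG xs := by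
  unfold pvG
  have hlen : (xs ++ [x]).length = xs.length + 1 := by simp
  rw [hlen]
  simp only [pvACollect, pvGetD_append_last xs x]
  by_cases hp : PySem.Str.isIn TOKEN_RECOMMENDED_DICT_START x = true
  · rw [if_pos hp, if_pos hp]
  · rw [if_neg hp, if_neg hp]
    unfold pvKeep
    cases he : extract_dictionary_element x with
    | none => simp [pvACollect_append xs x xs.length [] (le_refl _)]
    | some e =>
      simp only []
      by_cases hee : e = ""
      · rw [if_pos hee, if_pos hee]
        simp [pvACollect_append xs x xs.length [] (le_refl _)]
      · rw [if_neg hee, if_neg hee]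
        rw [pvACollect_append xs x xs.length ([] ++ [e]) (le_refl _)]
        rw [pvACollect_acc xs xs.length ([] ++ [e])]
        simp

theorem pvParseA_snoc (xs : List String) (x : String) :
    parse_recommended_dictionary_from_log_lines (xs ++ [x]) =
      if PySem.Str.isIn TOKEN_RECOMMENDED_DICT_END x then pvG xs
      else parse_recommended_dictionary_from_log_lines xs := by
  unfold parse_recommended_dictionary_from_log_lines
  have hlen : (xs ++ [x]).length = xs.length + 1 := by simp
  rw [hlen]
  simp only [pvAFindEnd, pvGetD_append_last xs x]
  by_cases hp : PySem.Str.isIn TOKEN_RECOMMENDED_DICT_END x = true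
  · rw [if_pos hp, if_pos hp]
    exact pvACollect_append xs x xs.length [] (le_refl _)
  · rw [if_neg hp, if_neg hp]
    rw [pvAFindEnd_append xs x xs.length (le_refl _)]
    exact pvACollect_append xs x (pvAFindEnd xs xs.length) [] (pvAFindEnd_le xs xs.length)

-- the fold invariant: first component is A's answer, second is the current section reversed
theorem pvInvariant (xs : List String) :
    xs.foldl pvBStep ([], []) =
      (parse_recommended_dictionary_from_log_lines xs, (pvG xs).reverse) := by
  induction xs using List.reverseRecOn with
  | nil =>
    simp [parse_recommended_dictionary_from_log_lines, pvAFindEnd, pvACollect, pvG]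
  | append_singleton xs x ih =>
    rw [List.foldl_append, ih]
    simp only [List.foldl_cons, List.foldl_nil]
    rw [pvParseA_snoc, pvG_snoc]
    unfold pvBStep
    simp only [List.reverse_reverse]
    by_cases hs : PySem.Str.isIn TOKEN_RECOMMENDED_DICT_START x = true
    · rw [if_pos hs, if_pos hs]
      simp
    · rw [if_neg hs, if_neg hs]
      unfold pvKeep
      cases he : extract_dictionary_element x with
      | none => simp
      | some e =>
        simp only []
        by_cases hee : e = ""
        · rw [if_pos hee, if_pos hee]; simp
        · rw [if_neg hee, if_neg hee]; simp

-- ===== VERDICT (by name: the statement is the Claim_ definition above) =====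
theorem parse_recommended_dictionary_from_log_lines_spec : Claim_equal_parse_recommended_dictionary_from_log_lines := by
  intro log_lines _
  unfold Spec_parse_recommended_dictionary_from_log_lines
  unfold parse_recommended_dictionary_from_log_lines_alt
  rw [pvInvariant]
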